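-- pv_equiv track=rewrite | github.com/JohnnyCanuck328/co-existence | existence.py | find_coexistance
-- ===== SOURCE A (Python) =====
-- def find_coexistance(D, query):
--     '''(dict,str)->list
--     See the assignment text for what this function should do'''
--     query = query.split()
--     found = []
--     not_found = []
--     return_list=[]
--     if len(query) == 0:
--         not_found.append("")
--         return not_found
--
--     for inc in range(len(query)):
--         if query[inc] in D:
--             found.append(query[inc])
--
--         else:
--             not_found.append(query[inc])
--             return not_found
--
--     co_exi = is_in(D, found)
--     return_list=co_exi
--
--     return return_list
--
-- def is_in(D, l):
--     com_list=list(D[l[0]])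
--     for inc in range(len(l)):
--         temp=list(D[l[inc]])
--         counter = 0
--         while counter < len(com_list):
--             if com_list[counter] not in temp:
--                 com_list.remove(com_list[counter])
--             else:
--                 counter=counter+1
--     com_list.sort()
--     return com_list
-- ===== SOURCE B (Python) =====
-- def find_coexistance(D, query):
--     '''(dict,str)->list
--     Intersect the word lists of all query words: precompute the set
--     intersection once, then filter the first word's list in one pass.'''
--     words = query.split()
--     if not words:
--         return [""]
--     for w in words:
--         if w not in D:
--             return [w]
--     common = set(D[words[0]])
--     for w in words[1:]:
--         common &= set(D[w])
--     return sorted(x for x in D[words[0]] if x in common)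
-- ===== Notes on version B (the rewrite author's own statement) =====
-- stated objective: simpler
-- what changed: A repeatedly prunes a shrinking candidate list in place (while-loop with list.remove) once per query word; B precomputes one set intersection of all the word lists and then keeps the matching elements of the first word's list in a single filtering pass before sorting.
import Mathlib
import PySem

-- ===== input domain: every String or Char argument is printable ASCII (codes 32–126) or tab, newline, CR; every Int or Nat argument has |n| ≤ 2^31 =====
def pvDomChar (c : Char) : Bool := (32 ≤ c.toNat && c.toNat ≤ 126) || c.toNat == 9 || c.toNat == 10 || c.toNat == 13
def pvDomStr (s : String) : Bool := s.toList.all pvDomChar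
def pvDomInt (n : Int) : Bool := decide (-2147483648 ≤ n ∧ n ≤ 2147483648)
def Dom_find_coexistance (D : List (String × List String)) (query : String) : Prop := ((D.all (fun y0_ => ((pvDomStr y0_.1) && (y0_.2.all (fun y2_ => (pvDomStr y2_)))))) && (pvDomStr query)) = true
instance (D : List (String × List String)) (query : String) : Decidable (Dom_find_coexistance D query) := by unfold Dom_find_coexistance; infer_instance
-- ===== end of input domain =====

-- B replaces A's repeated in-place pruning of a shrinking candidate list by one
-- precomputed set intersection followed by a single filtering pass (simpler).


-- ===== PORT A =====
-- dict primitives on the association list: 'k in D' and 'D[k]'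
-- (pvGet's default [] is unreachable: both programs look keys up only after the membership test)
def pvMem (D : List (String × List String)) (k : String) : Bool :=
  D.any (fun p => p.1 == k)

def pvGet (D : List (String × List String)) (k : String) : List String :=
  match D.find? (fun p => p.1 == k) with
  | some p => p.2
  | none => []

-- A's 'for inc in range(len(query))' loop: first word missing from D → .inl [word] (the
-- early 'return not_found'), else .inr found
def pvFindLoop (D : List (String × List String)) : List String → List String → (List String ⊕ List String)
  | [], found => .inr found
  | w :: rest, found =>
      if pvMem D w then pvFindLoop D rest (found ++ [w]) else .inl [w]

-- the 'while counter < len(com_list)' loop of is_in; com_list.remove(v) erases the first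
-- occurrence of v (v is present, being com[counter], so Python's remove never raises here)
def pvPrune (temp : List String) (com : List String) (counter : Nat) : List String :=
  if h : counter < com.length then
    if com[counter] ∈ temp then pvPrune temp com (counter + 1)
    else pvPrune temp (com.erase com[counter]) counter
  else com
termination_by com.length - counter
decreasing_by
  · omega
  · have := List.length_erase_of_mem (List.getElem_mem h) (a := com[counter])
    omega

def pv_is_in (D : List (String × List String)) (l : List String) : List String :=
  let com0 := pvGet D (l.headD "")   -- list(D[l[0]]); l is nonempty at every call site
  let com := l.foldl (fun com w => pvPrune (pvGet D w) com 0) com0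
  PySem.List.sorted com (fun x => x) false

def find_coexistance (D : List (String × List String)) (query : String) : List String :=
  let q := PySem.Str.split₀ query
  if q.length = 0 then [""]
  else
    match pvFindLoop D q [] with
    | .inl not_found => not_found
    | .inr found => pv_is_in D found

-- ===== PORT B =====
-- words[0] is words.headD "" (words is nonempty there); words[1:] is words.drop 1
def find_coexistance_alt (D : List (String × List String)) (query : String) : List String :=
  let words := PySem.Str.split₀ query
  if words.isEmpty then [""]
  else
    match words.find? (fun w => !pvMem D w) with
    | some w => [w]
    | none =>
        let first := pvGet D (words.headD "")
        let common : PySem.Set String :=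
          (words.drop 1).foldl (fun s w => PySem.Set.inter s (PySem.Set.ofList (pvGet D w)))
            (PySem.Set.ofList first)
        PySem.List.sorted (first.filter (fun x => PySem.Set.contains common x))
          (fun x => x) false

-- ===== PRECONDITION & SPEC =====
def Spec_find_coexistance (D : List (String × List String)) (query : String) (out : List String) : Prop := out = find_coexistance_alt D query
instance (D : List (String × List String)) (query : String) (out : List String) : Decidable (Spec_find_coexistance D query out) := by unfold Spec_find_coexistance; infer_instance

-- ===== CLAIM (what is proved, stated in full; the proofs are below) =====
def Claim_equal_find_coexistance : Prop := ∀ (D : List (String × List String)) (query : String), Dom_find_coexistance D query → Spec_find_coexistance D query (find_coexistance D query)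

-- ===== LEMMAS AND PROOFS =====

-- A's while loop keeps the already-inspected prefix and filters the rest
theorem pvPrune_take_drop (temp : List String) (com : List String) (counter : Nat) :
    (∀ x ∈ com.take counter, x ∈ temp) →
    pvPrune temp com counter
      = com.take counter ++ (com.drop counter).filter (fun x => decide (x ∈ temp)) := by
  induction com, counter using pvPrune.induct temp with
  | case1 com counter h hmem ih =>
      intro hpre
      rw [pvPrune, dif_pos h, if_pos hmem]
      have hdrop : com.drop counter = com[counter] :: com.drop (counter + 1) :=
        List.drop_eq_getElem_cons h
      have htake : com.take (counter + 1) = com.take counter ++ [com[counter]] :=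
        List.take_succ_eq_append_getElem h
      rw [ih ?_]
      · have hd : decide (com[counter] ∈ temp) = true := by simpa using hmem
        rw [htake, hdrop, List.filter_cons, hd, if_pos rfl, List.append_assoc,
          List.singleton_append]
      · intro x hx
        rw [htake] at hx
        rcases List.mem_append.mp hx with h1 | h1
        · exact hpre x h1
        · simpa using (List.mem_singleton.mp h1) ▸ hmem
  | case2 com counter h hmem ih =>
      intro hpre
      rw [pvPrune, dif_pos h, if_neg hmem]
      have hvne : com[counter] ∉ com.take counter := fun hx => hmem (hpre _ hx)
      have hdrop : com.drop counter = com[counter] :: com.drop (counter + 1) :=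
        List.drop_eq_getElem_cons h
      have herase : com.erase com[counter]
          = com.take counter ++ com.drop (counter + 1) := by
        calc com.erase com[counter]
            = (com.take counter ++ (com[counter] :: com.drop (counter + 1))).erase
                com[counter] := by rw [← hdrop, List.take_append_drop]
          _ = com.take counter ++ com.drop (counter + 1) := by
                rw [List.erase_append_right _ hvne, List.erase_cons_head]
      have hlen : (com.take counter).length = counter := by
        rw [List.length_take]; omega
      have htakeE : (com.erase com[counter]).take counter = com.take counter := by
        rw [herase, List.take_left' hlen]
      have hdropE : (com.erase com[counter]).drop counter = com.drop (counter + 1) := by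
        rw [herase, List.drop_left' hlen]
      have hdf : decide (com[counter] ∈ temp) = false := by simpa using hmem
      rw [ih ?_]
      · rw [htakeE, hdropE, hdrop, List.filter_cons, hdf, if_neg (by simp)]
      · intro x hx
        rw [htakeE] at hx
        exact hpre x hx
  | case3 com counter h =>
      intro hpre
      rw [pvPrune, dif_neg h]
      have : com.length ≤ counter := by omega
      simp [List.take_of_length_le this, List.drop_of_length_le this]

theorem pvPrune_zero (temp com : List String) :
    pvPrune temp com 0 = com.filter (fun x => decide (x ∈ temp)) := by
  simpa using pvPrune_take_drop temp com 0 (by simp)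

-- A's per-word pruning fold is one filter by membership in every word's list
theorem pvFold_eq_filter (D : List (String × List String)) (l : List String)
    (com0 : List String) :
    l.foldl (fun com w => pvPrune (pvGet D w) com 0) com0
      = com0.filter (fun x => decide (∀ w ∈ l, x ∈ pvGet D w)) := by
  induction l generalizing com0 with
  | nil => simp
  | cons w rest ih =>
      rw [List.foldl_cons, ih, pvPrune_zero, List.filter_filter]
      congr 1
      funext x
      by_cases h1 : x ∈ pvGet D w <;> by_cases h2 : ∀ u ∈ rest, x ∈ pvGet D u <;>
        simp [h1, h2]

-- A's find loop agrees with B's find?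
theorem pvFindLoop_eq (D : List (String × List String)) (ws acc : List String) :
    pvFindLoop D ws acc
      = match ws.find? (fun w => !pvMem D w) with
        | some w => .inl [w]
        | none => .inr (acc ++ ws) := by
  induction ws generalizing acc with
  | nil => simp [pvFindLoop]
  | cons w rest ih =>
      rw [pvFindLoop, List.find?_cons]
      by_cases hm : pvMem D w
      · rw [if_pos hm, ih]
        simp [hm]
      · rw [if_neg hm]
        simp [hm]

-- membership in B's intersected set
theorem mem_foldl_inter (x : String) (rest : List String)
    (D : List (String × List String)) (s : PySem.Set String) :
    x ∈ rest.foldl (fun s w => PySem.Set.inter s (PySem.Set.ofList (pvGet D w))) s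
      ↔ x ∈ s ∧ ∀ w ∈ rest, x ∈ pvGet D w := by
  induction rest generalizing s with
  | nil => simp
  | cons w rest ih =>
      rw [List.foldl_cons, ih]
      simp [PySem.Set.mem_inter, PySem.Set.mem_ofList, and_assoc]

-- ===== VERDICT (by name: the statement is the Claim_ definition above) =====
theorem find_coexistance_spec : Claim_equal_find_coexistance := by
  intro D query _
  show find_coexistance D query = find_coexistance_alt D query
  rw [find_coexistance, find_coexistance_alt]
  cases hq : PySem.Str.split₀ query with
  | nil => simp
  | cons w0 rest =>
      rw [if_neg (by simp), if_neg (by simp), pvFindLoop_eq]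
      cases hf : (w0 :: rest).find? (fun w => !pvMem D w) with
      | some w => rfl
      | none =>
          simp only [List.nil_append, List.headD_cons, List.drop_succ_cons, List.drop_zero]
          rw [pv_is_in]
          simp only [List.headD_cons]
          rw [pvFold_eq_filter]
          congr 1
          apply List.filter_congr
          intro x hx
          rw [Bool.eq_iff_iff, decide_eq_true_iff, PySem.Set.contains_iff,
            mem_foldl_inter]
          simp [PySem.Set.mem_ofList, hx]
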